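-- pv_equiv track=rewrite | github.com/slip686/MIMC | main.py | get_place_id_dict
-- ===== SOURCE A (Python) =====
-- def get_place_id_dict(docs_structure_list):
--     if docs_structure_list:
--         place_id_dict = {}
--         for i in docs_structure_list:
--             for j in i[1:]:
--                 if j:
--                     place_id_dict[j] = []
--         for i in docs_structure_list:
--             for k in place_id_dict:
--                 if k in i:
--                     place_id_dict[k].append(i[0])
--         return place_id_dict
-- ===== SOURCE B (Python) =====
-- def get_place_id_dict(docs_structure_list):
--     if not docs_structure_list:
--         return None
--     keys = {}
--     index = {}
--     for row in docs_structure_list: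
--         for j in row[1:]:
--             if j:
--                 keys[j] = None
--         for e in set(row):
--             index.setdefault(e, []).append(row[0])
--     return {k: index.get(k, []) for k in keys}
-- ===== Notes on version B (the rewrite author's own statement) =====
-- stated objective: faster
-- what changed: A rescans every row once per dict key in a second nested pass; B makes a single pass over the rows, building the ordered key dict and an inverted index element->doc-ids at once, then assembles the result by lookup.
import Mathlib
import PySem

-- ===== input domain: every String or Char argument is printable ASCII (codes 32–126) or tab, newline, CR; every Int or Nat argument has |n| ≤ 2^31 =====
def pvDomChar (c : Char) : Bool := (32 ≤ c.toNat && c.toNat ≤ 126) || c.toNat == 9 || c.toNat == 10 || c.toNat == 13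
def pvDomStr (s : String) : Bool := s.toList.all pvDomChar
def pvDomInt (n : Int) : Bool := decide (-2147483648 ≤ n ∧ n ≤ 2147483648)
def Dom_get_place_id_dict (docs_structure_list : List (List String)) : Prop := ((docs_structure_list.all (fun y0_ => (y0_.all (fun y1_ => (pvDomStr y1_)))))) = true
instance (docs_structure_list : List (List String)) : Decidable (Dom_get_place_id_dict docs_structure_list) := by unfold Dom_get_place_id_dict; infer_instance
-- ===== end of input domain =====

-- B replaces A's second full scan of all rows once per dict iteration (nested 'for i … for k in dict')
-- by a single pass over the rows that also builds an inverted index element → doc-ids.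

-- ===== PORT A =====
-- loop body of phase 1: 'if j: place_id_dict[j] = []'
def pvAins (d : PySem.Dict String (List String)) (j : String) : PySem.Dict String (List String) :=
  if j ≠ "" then d.insert j [] else d

-- phase 1: for i in docs_structure_list: for j in i[1:]: if j: place_id_dict[j] = []
def pvA_phase1 (l : List (List String)) : PySem.Dict String (List String) :=
  l.foldl (fun d i => (PySem.List.slice i (some 1) none).foldl pvAins d) PySem.Dict.empty

-- phase 2: for i in docs_structure_list: for k in place_id_dict: if k in i: place_id_dict[k].append(i[0])
-- i[0] is ported as (pyGet? i 0).getD "" — it is only evaluated under 'k in i', where i ≠ [] so pyGet? is some.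
def pvA_phase2 (l : List (List String)) (d0 : PySem.Dict String (List String)) : PySem.Dict String (List String) :=
  l.foldl (fun d i =>
    d.keys.foldl (fun d' k =>
      if i.contains k then d'.modify k [] (fun v => v ++ [(PySem.List.pyGet? i 0).getD ""]) else d') d) d0

def get_place_id_dict (docs_structure_list : List (List String)) : Option (List (String × List String)) :=
  if docs_structure_list ≠ [] then
    some (pvA_phase2 docs_structure_list (pvA_phase1 docs_structure_list)).items
  else none

-- ===== PORT B =====
-- loop body of B's keys loop: 'if j: keys[j] = None'  (value type Unit = the only value ever stored)
def pvBins (ks : PySem.Dict String Unit) (j : String) : PySem.Dict String Unit :=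
  if j ≠ "" then ks.insert j () else ks

-- B's inverted-index loop for one row: 'for e in set(row): index.setdefault(e, []).append(row[0])',
-- ported as insert e (getD e [] ++ [row[0]]): overwrite keeps position, a new key appends — exactly
-- setdefault+append.  The index is only looked up afterwards, so set iteration order cannot affect the result.
def pvIdxRow (idx : PySem.Dict String (List String)) (row : List String) : PySem.Dict String (List String) :=
  (PySem.Set.ofList row).foldl (fun idx e =>
    idx.insert e (idx.getD e [] ++ [(PySem.List.pyGet? row 0).getD ""])) idx

-- one pass over the rows, maintaining (keys, index)
def pvB_step (p : PySem.Dict String Unit × PySem.Dict String (List String)) (row : List String) :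
    PySem.Dict String Unit × PySem.Dict String (List String) :=
  ((PySem.List.slice row (some 1) none).foldl pvBins p.1, pvIdxRow p.2 row)

def get_place_id_dict_alt (docs_structure_list : List (List String)) : Option (List (String × List String)) :=
  if docs_structure_list = [] then none
  else
    let st := docs_structure_list.foldl pvB_step (PySem.Dict.empty, PySem.Dict.empty)
    some (st.1.keys.map (fun k => (k, st.2.getD k [])))

-- ===== PRECONDITION & SPEC =====
def Spec_get_place_id_dict (docs_structure_list : List (List String)) (out : Option (List (String × List String))) : Prop := out = get_place_id_dict_alt docs_structure_list
instance (docs_structure_list : List (List String)) (out : Option (List (String × List String))) : Decidable (Spec_get_place_id_dict docs_structure_list out) := by unfold Spec_get_place_id_dict; infer_instance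

-- ===== CLAIM (what is proved, stated in full; the proofs are below) =====
def Claim_equal_get_place_id_dict : Prop := ∀ (docs_structure_list : List (List String)), Dom_get_place_id_dict docs_structure_list → Spec_get_place_id_dict docs_structure_list (get_place_id_dict docs_structure_list)

-- ===== LEMMAS AND PROOFS =====

-- inserting (any values) on both sides of a key-equality keeps the key lists equal
theorem pv_keys_insert_congr {ν μ : Type} (d : PySem.Dict String ν) (ks : PySem.Dict String μ)
    (h : d.keys = ks.keys) (j : String) (v : ν) (w : μ) :
    (d.insert j v).keys = (ks.insert j w).keys := by
  by_cases hj : j ∈ d.keys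
  · rw [PySem.Dict.keys_insert_of_contains d v ((PySem.Dict.contains_iff_mem_keys d j).2 hj),
        PySem.Dict.keys_insert_of_contains ks w ((PySem.Dict.contains_iff_mem_keys ks j).2 (h ▸ hj)), h]
  · have hc : d.contains j = false := by
      cases hcc : d.contains j
      · rfl
      · exact absurd ((PySem.Dict.contains_iff_mem_keys d j).1 hcc) hj
    have hc' : ks.contains j = false := by
      cases hcc : ks.contains j
      · rfl
      · exact absurd (h ▸ (PySem.Dict.contains_iff_mem_keys ks j).1 hcc) hj
    rw [PySem.Dict.keys_insert_of_not_contains d v hc,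
        PySem.Dict.keys_insert_of_not_contains ks w hc', h]

-- A's phase-1 inner loop and B's keys loop produce the same key list
theorem pv_keys_inner (js : List String) (d : PySem.Dict String (List String))
    (ks : PySem.Dict String Unit) (h : d.keys = ks.keys) :
    (js.foldl pvAins d).keys = (js.foldl pvBins ks).keys := by
  induction js generalizing d ks with
  | nil => exact h
  | cons j t ih =>
    by_cases hj : j = ""
    · simpa [pvAins, pvBins, hj] using ih d ks h
    · simpa [pvAins, pvBins, hj] using ih _ _ (pv_keys_insert_congr d ks h j [] ())

theorem pv_keys_phase1 (l : List (List String)) (d : PySem.Dict String (List String))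
    (ks : PySem.Dict String Unit) (h : d.keys = ks.keys) :
    (l.foldl (fun d i => (PySem.List.slice i (some 1) none).foldl pvAins d) d).keys
      = (l.foldl (fun ks i => (PySem.List.slice i (some 1) none).foldl pvBins ks) ks).keys := by
  induction l generalizing d ks with
  | nil => exact h
  | cons i t ih => exact ih _ _ (pv_keys_inner _ d ks h)

theorem pv_nodup_inner (js : List String) (d : PySem.Dict String (List String))
    (h : d.keys.Nodup) : (js.foldl pvAins d).keys.Nodup := by
  induction js generalizing d with
  | nil => exact h
  | cons j t ih =>
    by_cases hj : j = ""
    · simpa [pvAins, hj] using ih d h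
    · simpa [pvAins, hj] using ih _ (PySem.Dict.nodup_keys_insert d j [] h)

theorem pv_nodup_phase1 (l : List (List String)) (d : PySem.Dict String (List String))
    (h : d.keys.Nodup) :
    (l.foldl (fun d i => (PySem.List.slice i (some 1) none).foldl pvAins d) d).keys.Nodup := by
  induction l generalizing d with
  | nil => exact h
  | cons i t ih => exact ih _ (pv_nodup_inner _ d h)

-- every value in A's phase-1 dict is []
theorem pv_vals_inner (js : List String) (d : PySem.Dict String (List String))
    (h : ∀ q, d.getD q [] = []) : ∀ q, (js.foldl pvAins d).getD q [] = [] := by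
  induction js generalizing d with
  | nil => exact h
  | cons j t ih =>
    by_cases hj : j = ""
    · simpa [pvAins, hj] using ih d h
    · have h' : ∀ q, (d.insert j []).getD q [] = [] := by
        intro q; rw [PySem.Dict.getD_insert]; split <;> simp [h]
      simpa [pvAins, hj] using ih _ h'

theorem pv_vals_phase1 (l : List (List String)) (d : PySem.Dict String (List String))
    (h : ∀ q, d.getD q [] = []) :
    ∀ q, (l.foldl (fun d i => (PySem.List.slice i (some 1) none).foldl pvAins d) d).getD q [] = [] := by
  induction l generalizing d with
  | nil => exact h
  | cons i t ih => exact ih _ (pv_vals_inner _ d h)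

-- A's per-row loop over the (distinct, present) key list: appends x exactly to the keys contained in i
theorem pvA_inner (i : List String) (x : String) (kl : List String) (d : PySem.Dict String (List String))
    (hnd : kl.Nodup) (hsub : ∀ k ∈ kl, k ∈ d.keys) :
    (kl.foldl (fun d' k => if i.contains k then d'.modify k [] (fun v => v ++ [x]) else d') d).keys = d.keys
    ∧ ∀ q, (kl.foldl (fun d' k => if i.contains k then d'.modify k [] (fun v => v ++ [x]) else d') d).getD q []
        = if q ∈ kl ∧ i.contains q = true then d.getD q [] ++ [x] else d.getD q [] := by
  induction kl generalizing d with
  | nil => simp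
  | cons k t ih =>
    obtain ⟨hk, hndt⟩ := List.nodup_cons.1 hnd
    by_cases hik : i.contains k = true
    · have hkeys1 : (d.modify k [] (fun v => v ++ [x])).keys = d.keys := by
        rw [PySem.Dict.keys_modify,
            PySem.Dict.keys_insert_of_contains _ _
              ((PySem.Dict.contains_iff_mem_keys d k).2 (hsub k (by simp)))]
      obtain ⟨ihk, ihv⟩ := ih (d.modify k [] (fun v => v ++ [x])) hndt
        (fun q hq => by rw [hkeys1]; exact hsub q (by simp [hq]))
      have hmem : k ∈ i := by simpa using hik
      constructor
      · rw [List.foldl_cons, if_pos hik]; exact ihk.trans hkeys1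
      · intro q
        rw [List.foldl_cons, if_pos hik, ihv q, PySem.Dict.getD_modify]
        by_cases hqk : q = k
        · subst hqk
          simp [hk, hmem]
        · simp [hqk]
    · have hnm : k ∉ i := by simpa using hik
      obtain ⟨ihk, ihv⟩ := ih d hndt (fun q hq => hsub q (by simp [hq]))
      constructor
      · rw [List.foldl_cons, if_neg hik]; exact ihk
      · intro q
        rw [List.foldl_cons, if_neg hik, ihv q]
        by_cases hqk : q = k
        · subst hqk; simp [hnm]
        · simp [hqk]

-- the common answer: doc-ids of the rows containing q, in row order
def pvV (l : List (List String)) (q : String) : List String :=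
  (l.filter (fun i => i.contains q)).map (fun i => (PySem.List.pyGet? i 0).getD "")

theorem pvA_phase2_spec (l : List (List String)) (d : PySem.Dict String (List String))
    (hnd : d.keys.Nodup) :
    (pvA_phase2 l d).keys = d.keys
    ∧ ∀ q ∈ d.keys, (pvA_phase2 l d).getD q [] = d.getD q [] ++ pvV l q := by
  induction l generalizing d with
  | nil => simp [pvA_phase2, pvV]
  | cons i t ih =>
    obtain ⟨hik, hiv⟩ := pvA_inner i ((PySem.List.pyGet? i 0).getD "") d.keys d hnd (fun _ h => h)
    set d1 := d.keys.foldl (fun d' k => if i.contains k then d'.modify k [] (fun v => v ++ [(PySem.List.pyGet? i 0).getD ""]) else d') d with hd1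
    obtain ⟨ihk, ihv⟩ := ih d1 (hik ▸ hnd)
    constructor
    · rw [pvA_phase2, List.foldl_cons, ← hd1]
      exact (ihk.trans hik : (pvA_phase2 t d1).keys = d.keys)
    · intro q hq
      rw [pvA_phase2, List.foldl_cons, ← hd1]
      have hrec : (pvA_phase2 t d1).getD q [] = d1.getD q [] ++ pvV t q := ihv q (hik ▸ hq)
      simp only [pvA_phase2] at hrec
      rw [hrec, hiv q]
      by_cases hm : q ∈ i
      · simp [pvV, hq, hm]
      · simp [pvV, hq, hm]

theorem pvB_idx_inner (es : List String) (x : String) (hnd : es.Nodup)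
    (idx : PySem.Dict String (List String)) (q : String) :
    (es.foldl (fun idx e => idx.insert e (idx.getD e [] ++ [x])) idx).getD q []
      = if q ∈ es then idx.getD q [] ++ [x] else idx.getD q [] := by
  induction es generalizing idx with
  | nil => simp
  | cons e t ih =>
    obtain ⟨he, hndt⟩ := List.nodup_cons.1 hnd
    rw [List.foldl_cons, ih hndt]
    by_cases hqe : q = e
    · subst hqe
      simp [he]
    · rw [PySem.Dict.getD_insert]
      simp [hqe]

theorem pvB_idx_rows (l : List (List String)) (idx : PySem.Dict String (List String)) (q : String) :
    (l.foldl pvIdxRow idx).getD q [] = idx.getD q [] ++ pvV l q := by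
  induction l generalizing idx with
  | nil => simp [pvV]
  | cons row t ih =>
    rw [List.foldl_cons, ih]
    have h1 : (pvIdxRow idx row).getD q [] =
        if q ∈ PySem.Set.ofList row then idx.getD q [] ++ [(PySem.List.pyGet? row 0).getD ""] else idx.getD q [] :=
      pvB_idx_inner _ _ (PySem.Set.nodup_ofList row) idx q
    rw [h1]
    by_cases hm : q ∈ row
    · have : q ∈ PySem.Set.ofList row := (PySem.Set.mem_ofList row q).2 hm
      simp [this, pvV, hm]
    · have : q ∉ PySem.Set.ofList row := fun h => hm ((PySem.Set.mem_ofList row q).1 h)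
      simp [this, pvV, hm]

-- B's paired fold is the pair of the two independent folds
theorem pv_pair_foldl (l : List (List String)) (a : PySem.Dict String Unit)
    (b : PySem.Dict String (List String)) :
    l.foldl pvB_step (a, b)
      = (l.foldl (fun ks i => (PySem.List.slice i (some 1) none).foldl pvBins ks) a,
         l.foldl pvIdxRow b) := by
  induction l generalizing a b with
  | nil => rfl
  | cons row t ih => simp [pvB_step, ih]

-- ===== VERDICT (by name: the statement is the Claim_ definition above) =====
theorem get_place_id_dict_spec : Claim_equal_get_place_id_dict := by
  intro l _
  unfold Spec_get_place_id_dict get_place_id_dict get_place_id_dict_alt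
  rcases eq_or_ne l [] with rfl | hne
  · rfl
  · rw [if_pos hne, if_neg hne]
    simp only [pv_pair_foldl]
    have hnd0 : (pvA_phase1 l).keys.Nodup :=
      pv_nodup_phase1 l PySem.Dict.empty (by simp [PySem.Dict.keys_empty])
    obtain ⟨hk2, hv2⟩ := pvA_phase2_spec l (pvA_phase1 l) hnd0
    have hnd2 : (pvA_phase2 l (pvA_phase1 l)).keys.Nodup := hk2 ▸ hnd0
    have hkeq : (pvA_phase1 l).keys
        = (l.foldl (fun ks i => (PySem.List.slice i (some 1) none).foldl pvBins ks) PySem.Dict.empty).keys :=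
      pv_keys_phase1 l PySem.Dict.empty PySem.Dict.empty (by simp [PySem.Dict.keys_empty])
    rw [PySem.Dict.items_eq_map_keys _ hnd2 [], hk2, hkeq]
    congr 1
    apply List.map_congr_left
    intro k hkmem
    have hkA : k ∈ (pvA_phase1 l).keys := hkeq ▸ hkmem
    have h1 : (pvA_phase2 l (pvA_phase1 l)).getD k [] = pvV l k := by
      have hz : (pvA_phase1 l).getD k [] = [] := by
        simpa [pvA_phase1] using
          pv_vals_phase1 l PySem.Dict.empty (fun q => PySem.Dict.getD_empty q []) k
      rw [hv2 k hkA, hz]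
      simp
    have h2 : (l.foldl pvIdxRow PySem.Dict.empty).getD k [] = pvV l k := by
      rw [pvB_idx_rows, PySem.Dict.getD_empty]
      simp
    rw [h1, h2]
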